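-- pv_equiv track=rewrite | github.com/d4rt/aoc | aoc2021/12.py | parse
-- ===== SOURCE A (Python) =====
-- def parse(lines):
--     parsed = [x.split('-') for x in lines]
--     graph = {}
--     for f,t in parsed:
--         if f in graph:
--             graph[f].append(t)
--         else:
--             graph[f] = [t]
--         if t in graph:
--             graph[t].append(f)
--         else:
--             graph[t] = [f]
--     return graph
-- ===== SOURCE B (Python) =====
-- def parse(lines):
--     # Group-by-scanning: no incremental dict updates at all. Compute the key
--     # order once (first occurrence among all endpoints, f before t per line),
--     # then build each node's full neighbor list with one comprehension that
--     # scans the pair list.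
--     pairs = [line.split('-') for line in lines]
--     nodes = dict.fromkeys(x for pair in pairs for x in pair)
--     return {u: [w for f, t in pairs
--                   for w in (([t] if f == u else []) + ([f] if t == u else []))]
--             for u in nodes}
-- ===== Notes on version B (the rewrite author's own statement) =====
-- stated objective: alternative
-- what changed: A builds the dict incrementally, appending to per-key lists with if/else membership branches as it scans edges; B never updates a dict: it computes the key order once (ordered dedup of all endpoints) and then builds each node's complete neighbor list with a comprehension that rescans the pair list, trading A's single accumulating pass for a per-key group-by scan.
import Mathlib
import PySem

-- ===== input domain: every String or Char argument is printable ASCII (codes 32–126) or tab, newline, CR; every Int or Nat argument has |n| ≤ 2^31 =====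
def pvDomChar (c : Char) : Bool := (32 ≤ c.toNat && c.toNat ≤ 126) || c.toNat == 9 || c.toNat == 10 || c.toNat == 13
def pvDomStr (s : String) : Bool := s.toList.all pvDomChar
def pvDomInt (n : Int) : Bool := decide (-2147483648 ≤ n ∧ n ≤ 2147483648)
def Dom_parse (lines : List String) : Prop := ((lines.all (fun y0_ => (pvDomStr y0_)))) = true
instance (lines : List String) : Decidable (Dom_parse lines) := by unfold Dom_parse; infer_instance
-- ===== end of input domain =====

-- B replaces A's incremental dict building by a group-by-scan: key order computed once,
-- then each node's whole neighbor list built by scanning the pair list (alternative structure).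

-- ===== PORT A =====
def parse (lines : List String) : List (String × List String) :=
  let parsed := lines.map (fun x => (PySem.Str.split? x "-").getD [])
  let graph := parsed.foldl (fun g p =>
    let f := p.getD 0 ""
    let t := p.getD 1 ""
    let g := if g.contains f then g.insert f (g.getD f [] ++ [t]) else g.insert f [t]
    if g.contains t then g.insert t (g.getD t [] ++ [f]) else g.insert t [f])
    PySem.Dict.empty
  graph.items

-- ===== PORT B =====
def parse_alt (lines : List String) : List (String × List String) :=
  let pairs := lines.map (fun line => (PySem.Str.split? line "-").getD [])
  let nodes := PySem.List.dedup (pairs.flatMap (fun pair => pair))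
  nodes.map (fun u => (u,
    pairs.flatMap (fun p =>
      (if p.getD 0 "" == u then [p.getD 1 ""] else []) ++
      (if p.getD 1 "" == u then [p.getD 0 ""] else []))))

-- ===== PRECONDITION & SPEC =====
-- Pre_ excludes lines not splitting into exactly two parts on '-': there Python A (and B)
-- raises ValueError while unpacking 'for f,t in …'.
def Pre_parse (lines : List String) : Prop :=
  ∀ l ∈ lines, ((PySem.Str.split? l "-").getD []).length = 2
instance (lines : List String) : Decidable (Pre_parse lines) := by unfold Pre_parse; infer_instance
def pvWitness_parse : List String := ["start-a", "a-end"]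

def Spec_parse (lines : List String) (out : List (String × List String)) : Prop := out = parse_alt lines
instance (lines : List String) (out : List (String × List String)) : Decidable (Spec_parse lines out) := by unfold Spec_parse; infer_instance

-- ===== CLAIM (what is proved, stated in full; the proofs are below) =====
def Claim_equal_parse : Prop := ∀ (lines : List String), Dom_parse lines → Pre_parse lines → Spec_parse lines (parse lines)

-- ===== LEMMAS AND PROOFS =====

-- A's branchy per-endpoint update is exactly a modify.
theorem step_eq_modify (g : PySem.Dict String (List String)) (f t : String) :
    (if g.contains f then g.insert f (g.getD f [] ++ [t]) else g.insert f [t])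
      = g.modify f [] (· ++ [t]) := by
  by_cases h : g.contains f = true
  · rw [if_pos h]; rfl
  · rw [if_neg h]
    have h2 : g.get? f = none := by
      rw [PySem.Dict.get?_eq_none_iff_contains]; simpa using h
    show g.insert f [t] = g.insert f (g.getD f [] ++ [t])
    simp [PySem.Dict.getD, h2]

-- the directed edge list A's loop effectively processes
def pvEdges (pairs : List (List String)) : List (String × String) :=
  pairs.flatMap (fun p => [(p.getD 0 "", p.getD 1 ""), (p.getD 1 "", p.getD 0 "")])

-- A's fold is the modify-fold over pvEdges.
theorem parse_eq_edge_fold (lines : List String) :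
    parse lines = ((pvEdges (lines.map (fun x => (PySem.Str.split? x "-").getD []))).foldl
      (fun (g : PySem.Dict String (List String)) e => g.modify e.1 [] (· ++ [e.2]))
      PySem.Dict.empty).items := by
  unfold parse pvEdges
  dsimp only
  congr 1
  rw [List.foldl_flatMap]
  apply PySem.List.foldl_congr_mem
  intro g p _
  simp only [List.foldl]
  rw [step_eq_modify, step_eq_modify]

theorem two_elem_getD (p : List String) (h : p.length = 2) :
    [p.getD 0 "", p.getD 1 ""] = p := by
  match p, h with
  | [a, b], _ => rfl

-- ===== VERDICT (by name: the statement is the Claim_ definition above) =====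
theorem parse_spec : Claim_equal_parse := by
  intro lines _ hpre
  unfold Spec_parse parse_alt
  rw [parse_eq_edge_fold]
  set pairs := lines.map (fun x => (PySem.Str.split? x "-").getD []) with hpairs
  have hlen : ∀ p ∈ pairs, p.length = 2 := by
    intro p hp
    rw [hpairs] at hp
    obtain ⟨l, hl, rfl⟩ := List.mem_map.mp hp
    exact hpre l hl
  set d := (pvEdges pairs).foldl
      (fun (g : PySem.Dict String (List String)) e => g.modify e.1 [] (· ++ [e.2]))
      PySem.Dict.empty with hd
  have hnodup : d.keys.Nodup := by
    rw [hd]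
    exact PySem.Dict.nodup_keys_foldl_modify_key (pvEdges pairs) Prod.fst []
      (fun _ e => (· ++ [e.2])) PySem.Dict.empty (by simp)
  have hkeys : d.keys = PySem.List.dedup (pairs.flatMap (fun pair => pair)) := by
    rw [hd]
    rw [PySem.Dict.keys_foldl_modify_key (key := Prod.fst)]
    have : (pvEdges pairs).map Prod.fst = pairs.flatMap (fun pair => pair) := by
      unfold pvEdges
      rw [List.map_flatMap]
      apply List.flatMap_congr
      intro p hp
      simpa using (two_elem_getD p (hlen p hp))
    simp [this, PySem.Set.update, PySem.Set.ofList_eq_foldl, PySem.Dict.keys,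
      PySem.Dict.empty]
  rw [PySem.Dict.items_eq_map_keys d hnodup [], hkeys]
  apply List.map_congr_left
  intro u _
  congr 1
  rw [hd, PySem.Dict.getD_foldl_modify_append]
  unfold pvEdges
  rw [List.filter_flatMap, List.map_flatMap]
  simp only [PySem.Dict.getD_empty, List.nil_append]
  apply List.flatMap_congr
  intro p hp
  match p, hlen p hp with
  | [a, b], _ =>
    cases h1 : (a == u) <;> cases h2 : (b == u) <;> simp [List.filter, h1, h2]
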